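-- pv_equiv track=rewrite | github.com/okulchitska/prefix | Project 2/Resources/CommonResources/Tools/TTSInject/TTSCyberarkLib/CyberArk_PS.py | conceal
-- ===== SOURCE A (Python) =====
-- def conceal(filedata, pwd, filename="no filename provided for debugging"):
--     """given filedata, perform the transformations due to password concealment
--
--        Note: this method is not public
--
--     :Non-keyword arguments:
--         - filedata -- the buffer of the file to be cleaned
--         - pwd -- value of the password to be hidden
--         - filename -- only used for debugging
--
--     """
--
--     # We need to keep the same string length to not destroy the .rex while it is still open
--
--     # init for concealment in .rex
--     pwd_rex1 = ""; concealedpwd1 = ""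
--     pwd_rex2 = ""; concealedpwd2 = ""
--
--     # init for concealment in .log
--     pwd_log = ""
--
--     # dictionnary of special characters
--     specials = {
--             "&":{"replace1":"\&amp;", "replace2":"&amp;", "replace3":"\&"},
--             "<":{"replace1":"&lt;", "replace2":"&lt;", "replace3":"<"},
--             ">":{"replace1":"&gt;", "replace2":"&gt;", "replace3":">"},
--             "'":{"replace1":"&apos;", "replace2":"&apos;", "replace3":"'"},
--             '"':{"replace1":"&quot;", "replace2":"&quot;", "replace3":'"'}}
--
--     # inspect each character of the password
--     for character in pwd:
--
--         # if special XML escaped character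
--         if character in specials:
--
--             #append replacement to first pattern in  .rex
--             pwd_rex1 = pwd_rex1 + specials[character]["replace1"]
--             #append the exact same number of * in concealpwd1
--             concealedpwd1 = concealedpwd1 + ("*" * len(specials[character]["replace1"]))
--
--             #append replacement to second pattern in .rex
--             pwd_rex2 = pwd_rex2 + specials[character]["replace2"]
--             #append the exact same number of * in concealpwd2
--             concealedpwd2 = concealedpwd2 + ("*" * len(specials[character]["replace2"]))
--
--             #append replacement to first pattern in .log (length of concealment does not hurt here so we will use concealedpwd1)
--             pwd_log = pwd_log + specials[character]["replace3"]
--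
--         # not an XML escaped character
--         else:
--             pwd_rex1 = pwd_rex1 + character
--             pwd_rex2 = pwd_rex2 + character
--             concealedpwd1 = concealedpwd1 + "*"
--             concealedpwd2 = concealedpwd2 + "*"
--             pwd_log = pwd_log + character
--
--     pwd_rex1 = str(pwd_rex1)
--     pwd_rex2 = str(pwd_rex2)
--     pwd_log = str(pwd_log)
--     pwd = str(pwd)
--
--
--     if pwd_rex1 in filedata:
--         filedata = filedata.replace(pwd_rex1, concealedpwd1)
--     if pwd_rex2 in filedata:
--         filedata = filedata.replace(pwd_rex2, concealedpwd2)
--     if pwd_log in filedata: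
--         filedata = filedata.replace(pwd_log, concealedpwd1)
--     if pwd in filedata:
--         filedata = filedata.replace(pwd, concealedpwd1)
--
--     return filedata
-- ===== SOURCE B (Python) =====
-- def conceal(filedata, pwd, filename="no filename provided for debugging"):
--     """Conceal pwd and its XML-escaped forms in filedata with asterisks."""
--     def esc(s, amp):
--         # '&' first, so the '&' introduced by the other escapes is untouched
--         return (s.replace("&", amp).replace("<", "&lt;").replace(">", "&gt;")
--                  .replace("'", "&apos;").replace('"', "&quot;"))
--     pwd_rex1 = esc(pwd, "\&amp;")
--     pwd_rex2 = esc(pwd, "&amp;")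
--     pwd_log = pwd.replace("&", "\&")
--     stars1 = "*" * len(pwd_rex1)
--     stars2 = "*" * len(pwd_rex2)
--     for pat, rep in ((pwd_rex1, stars1), (pwd_rex2, stars2),
--                      (pwd_log, stars1), (pwd, stars1)):
--         if pat in filedata:
--             filedata = filedata.replace(pat, rep)
--     return filedata
-- ===== Notes on version B (the rewrite author's own statement) =====
-- stated objective: idiomatic
-- what changed: B replaces A's single character loop that accumulates five parallel strings by the standard staged-pass XML-escape idiom: chained whole-string str.replace passes ('&' first, then the four bracket/quote escapes) build the two escaped forms and the log form, the asterisk masks are derived from the escaped lengths, and the four guarded replaces run from a data table.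
import Mathlib
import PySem

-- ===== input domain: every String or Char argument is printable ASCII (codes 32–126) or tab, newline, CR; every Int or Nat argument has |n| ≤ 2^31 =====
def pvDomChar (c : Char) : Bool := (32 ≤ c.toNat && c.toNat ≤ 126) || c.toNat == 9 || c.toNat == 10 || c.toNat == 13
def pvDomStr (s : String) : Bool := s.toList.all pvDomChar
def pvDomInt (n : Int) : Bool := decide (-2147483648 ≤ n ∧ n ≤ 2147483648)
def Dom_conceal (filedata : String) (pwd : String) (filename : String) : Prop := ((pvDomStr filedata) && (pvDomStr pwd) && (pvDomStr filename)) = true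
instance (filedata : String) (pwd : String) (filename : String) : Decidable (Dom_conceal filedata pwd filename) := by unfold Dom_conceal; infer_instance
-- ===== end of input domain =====

-- B replaces A's character loop with five parallel accumulators by the standard staged-pass
-- XML-escape idiom: chained whole-string replaces ('&' first) build the escaped forms, the
-- asterisk masks come from their lengths, and the four guarded replaces run from a table
-- (objective: idiomatic; a timing run measured B faster by a constant factor —
-- C-level whole-string replaces vs a Python-level per-character loop). B equals A on all inputs.

-- ===== PORT A =====
-- the 'specials' dict of dicts, verbatim
def pvSpecials : PySem.Dict Char (PySem.Dict String String) := PySem.Dict.ofList [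
  ('&', PySem.Dict.ofList [("replace1", "\\&amp;"), ("replace2", "&amp;"), ("replace3", "\\&")]),
  ('<', PySem.Dict.ofList [("replace1", "&lt;"), ("replace2", "&lt;"), ("replace3", "<")]),
  ('>', PySem.Dict.ofList [("replace1", "&gt;"), ("replace2", "&gt;"), ("replace3", ">")]),
  ('\'', PySem.Dict.ofList [("replace1", "&apos;"), ("replace2", "&apos;"), ("replace3", "'")]),
  ('"', PySem.Dict.ofList [("replace1", "&quot;"), ("replace2", "&quot;"), ("replace3", "\"")])]

-- one iteration of A's 'for character in pwd' loop over the state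
-- (pwd_rex1, concealedpwd1, pwd_rex2, concealedpwd2, pwd_log); the `getD … Dict.empty`/`getD … ""`
-- defaults are never used: the branch guarantees the keys are present
def pvStepA (st : List Char × List Char × List Char × List Char × List Char) (character : Char) :
    List Char × List Char × List Char × List Char × List Char :=
  if pvSpecials.contains character then
    let sub := pvSpecials.getD character PySem.Dict.empty
    (st.1 ++ (sub.getD "replace1" "").toList,
     st.2.1 ++ List.replicate (PySem.Str.len (sub.getD "replace1" "")).toNat '*',
     st.2.2.1 ++ (sub.getD "replace2" "").toList,
     st.2.2.2.1 ++ List.replicate (PySem.Str.len (sub.getD "replace2" "")).toNat '*',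
     st.2.2.2.2 ++ (sub.getD "replace3" "").toList)
  else
    (st.1 ++ [character], st.2.1 ++ ['*'], st.2.2.1 ++ [character],
     st.2.2.2.1 ++ ['*'], st.2.2.2.2 ++ [character])

def conceal (filedata : String) (pwd : String) (filename : String) : String :=
  let st := pwd.toList.foldl pvStepA ([], [], [], [], [])
  let fd0 := filedata.toList
  let fd1 := if PySem.Chars.isIn st.1 fd0 then PySem.Chars.replace fd0 st.1 st.2.1 else fd0
  let fd2 := if PySem.Chars.isIn st.2.2.1 fd1 then PySem.Chars.replace fd1 st.2.2.1 st.2.2.2.1 else fd1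
  let fd3 := if PySem.Chars.isIn st.2.2.2.2 fd2 then PySem.Chars.replace fd2 st.2.2.2.2 st.2.1 else fd2
  let fd4 := if PySem.Chars.isIn pwd.toList fd3 then PySem.Chars.replace fd3 pwd.toList st.2.1 else fd3
  String.ofList fd4

-- ===== PORT B =====
-- Source B's esc helper: chained whole-string replaces, '&' first
def pvEsc (s : List Char) (amp : List Char) : List Char :=
  PySem.Chars.replace (PySem.Chars.replace (PySem.Chars.replace (PySem.Chars.replace
    (PySem.Chars.replace s "&".toList amp)
    "<".toList "&lt;".toList) ">".toList "&gt;".toList)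
    "'".toList "&apos;".toList) "\"".toList "&quot;".toList

def conceal_alt (filedata : String) (pwd : String) (filename : String) : String :=
  let rex1 := pvEsc pwd.toList "\\&amp;".toList
  let rex2 := pvEsc pwd.toList "&amp;".toList
  let log := PySem.Chars.replace pwd.toList "&".toList "\\&".toList
  let stars1 := List.replicate rex1.length '*'
  let stars2 := List.replicate rex2.length '*'
  String.ofList <| [(rex1, stars1), (rex2, stars2), (log, stars1), (pwd.toList, stars1)].foldl
    (fun fd pr => if PySem.Chars.isIn pr.1 fd then PySem.Chars.replace fd pr.1 pr.2 else fd)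
    filedata.toList

-- ===== PRECONDITION & SPEC =====
def Spec_conceal (filedata : String) (pwd : String) (filename : String) (out : String) : Prop := out = conceal_alt filedata pwd filename
instance (filedata : String) (pwd : String) (filename : String) (out : String) : Decidable (Spec_conceal filedata pwd filename out) := by unfold Spec_conceal; infer_instance

-- ===== CLAIM =====
def Claim_equal_conceal : Prop := ∀ (filedata : String) (pwd : String) (filename : String), Dom_conceal filedata pwd filename → Spec_conceal filedata pwd filename (conceal filedata pwd filename)

-- ===== LEMMAS AND PROOFS =====

-- the per-character effect of each of B's passes / of A's loop, used only by the proofs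
def pvTrans1 (c : Char) : List Char :=
  if c = '&' then "\\&amp;".toList else if c = '<' then "&lt;".toList
  else if c = '>' then "&gt;".toList else if c = '\'' then "&apos;".toList
  else if c = '"' then "&quot;".toList else [c]

def pvTrans2 (c : Char) : List Char :=
  if c = '&' then "&amp;".toList else if c = '<' then "&lt;".toList
  else if c = '>' then "&gt;".toList else if c = '\'' then "&apos;".toList
  else if c = '"' then "&quot;".toList else [c]

def pvTrans3 (c : Char) : List Char := if c = '&' then "\\&".toList else [c]

-- replace with a one-character pattern substitutes every occurrence independently
lemma pv_go_single (p : Char) (r : List Char) :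
    ∀ (l : List Char) (fuel : Nat) (acc : List Char), l.length ≤ fuel →
      PySem.Chars.replace.go [p] r fuel l acc =
        acc.reverse ++ l.flatMap (fun c => if c = p then r else [c]) := by
  intro l
  induction l with
  | nil => intro fuel acc _; cases fuel <;> simp [PySem.Chars.replace.go]
  | cons c t ih =>
    intro fuel acc h
    cases fuel with
    | zero => simp at h
    | succ n =>
      rw [PySem.Chars.replace.go]
      simp only [List.length_cons, Nat.succ_le_succ_iff] at h
      by_cases hc : c = p
      · subst hc
        simp only [List.isPrefixOf, beq_self_eq_true, Bool.true_and,
          if_pos, List.length_nil, List.length_cons, Nat.zero_add, List.drop_succ_cons,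
          List.drop_zero]
        rw [ih n _ h]
        simp
      · have hpre : [p].isPrefixOf (c :: t) = false := by
          simp [List.isPrefixOf]; exact fun hh => hc hh.symm
        rw [if_neg (by simp [hpre])]
        rw [ih n _ h]
        simp [hc]

lemma pv_replace_single (l : List Char) (p : Char) (r : List Char) :
    PySem.Chars.replace l [p] r = l.flatMap (fun c => if c = p then r else [c]) := by
  rw [PySem.Chars.replace]
  simp only [List.isEmpty_cons, Bool.false_eq_true, if_false]
  exact pv_go_single p r l l.length [] le_rfl

-- the chained passes collapse to the per-character map (for both amp replacements)
lemma pvEsc_eq_trans1 (l : List Char) : pvEsc l "\\&amp;".toList = l.flatMap pvTrans1 := by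
  have e1 : "&".toList = ['&'] := rfl
  have e2 : "<".toList = ['<'] := rfl
  have e3 : ">".toList = ['>'] := rfl
  have e4 : "'".toList = ['\''] := rfl
  have e5 : "\"".toList = ['"'] := rfl
  simp only [pvEsc, e1, e2, e3, e4, e5, pv_replace_single, List.flatMap_assoc]
  refine List.flatMap_congr (fun c _ => ?_)
  by_cases h1 : c = '&'; · subst h1; decide
  by_cases h2 : c = '<'; · subst h2; decide
  by_cases h3 : c = '>'; · subst h3; decide
  by_cases h4 : c = '\''; · subst h4; decide
  by_cases h5 : c = '"'; · subst h5; decide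
  simp [pvTrans1, h1, h2, h3, h4, h5]

lemma pvEsc_eq_trans2 (l : List Char) : pvEsc l "&amp;".toList = l.flatMap pvTrans2 := by
  have e1 : "&".toList = ['&'] := rfl
  have e2 : "<".toList = ['<'] := rfl
  have e3 : ">".toList = ['>'] := rfl
  have e4 : "'".toList = ['\''] := rfl
  have e5 : "\"".toList = ['"'] := rfl
  simp only [pvEsc, e1, e2, e3, e4, e5, pv_replace_single, List.flatMap_assoc]
  refine List.flatMap_congr (fun c _ => ?_)
  by_cases h1 : c = '&'; · subst h1; decide
  by_cases h2 : c = '<'; · subst h2; decide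
  by_cases h3 : c = '>'; · subst h3; decide
  by_cases h4 : c = '\''; · subst h4; decide
  by_cases h5 : c = '"'; · subst h5; decide
  simp [pvTrans2, h1, h2, h3, h4, h5]

lemma pvLog_eq_trans3 (l : List Char) :
    PySem.Chars.replace l "&".toList "\\&".toList = l.flatMap pvTrans3 := by
  have e1 : "&".toList = ['&'] := rfl
  simp only [e1, pv_replace_single]
  exact List.flatMap_congr (fun c _ => by by_cases h : c = '&' <;> simp [pvTrans3, h])

-- one step of A's loop appends exactly the three translations and the matching stars
lemma pvStepA_eq (st : List Char × List Char × List Char × List Char × List Char) (c : Char) :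
    pvStepA st c =
      (st.1 ++ pvTrans1 c, st.2.1 ++ List.replicate (pvTrans1 c).length '*',
       st.2.2.1 ++ pvTrans2 c, st.2.2.2.1 ++ List.replicate (pvTrans2 c).length '*',
       st.2.2.2.2 ++ pvTrans3 c) := by
  by_cases h1 : c = '&'
  · subst h1; rfl
  by_cases h2 : c = '<'
  · subst h2; rfl
  by_cases h3 : c = '>'
  · subst h3; rfl
  by_cases h4 : c = '\''
  · subst h4; rfl
  by_cases h5 : c = '"'
  · subst h5; rfl
  have hcont : pvSpecials.contains c = false := by
    simp [pvSpecials, PySem.Dict.ofList, PySem.Dict.update, PySem.Dict.contains,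
      PySem.Dict.insert, PySem.Dict.empty]
    exact ⟨fun h => h1 h.symm, fun h => h2 h.symm, fun h => h3 h.symm,
      fun h => h4 h.symm, fun h => h5 h.symm⟩
  simp [pvStepA, hcont, pvTrans1, pvTrans2, pvTrans3, h1, h2, h3, h4, h5]

-- A's loop, from any state, computes the flatMap translations with stars of the same length
lemma pvLoopA_eq (l : List Char) :
    ∀ st : List Char × List Char × List Char × List Char × List Char,
      l.foldl pvStepA st =
        (st.1 ++ l.flatMap pvTrans1,
         st.2.1 ++ List.replicate (l.flatMap pvTrans1).length '*',
         st.2.2.1 ++ l.flatMap pvTrans2,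
         st.2.2.2.1 ++ List.replicate (l.flatMap pvTrans2).length '*',
         st.2.2.2.2 ++ l.flatMap pvTrans3) := by
  induction l with
  | nil => intro st; simp
  | cons c l ih =>
    intro st
    rw [List.foldl_cons, pvStepA_eq, ih]
    simp [List.append_assoc, List.length_append, ← List.replicate_append_replicate]

-- ===== VERDICT =====
theorem conceal_spec : Claim_equal_conceal := by
  intro filedata pwd filename _
  unfold Spec_conceal conceal conceal_alt
  rw [pvLoopA_eq, pvEsc_eq_trans1, pvEsc_eq_trans2, pvLog_eq_trans3]
  simp [List.foldl]
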